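-- pv_equiv track=rewrite | github.com/Ibrmustafayev/Python-Projects | PasswordApp/PasswordApp.py | check_keyboard_walk
-- ===== SOURCE A (Python) =====
-- KEYBOARD_WALKS = [
--     "qwertyuiop", "asdfghjkl", "zxcvbnm",
--     "poiuytrewq", "lkjhgfdsa", "mnbvcxz",
--     "qazwsxedcrfvtgbyhnujmikolp", "1qaz2wsx3edc4rfv5tgb6yhn7ujm8ik9ol",
--     "1234567890", "0987654321", "qweasdzxc", "qazxswedc",
--     "147258369", "963852741", "123654789",
--     "!@#$%^&*()", "qwerty", "asdfgh", "zxcvbn",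
-- ]
--
-- def check_keyboard_walk(password):
--     """Return the longest keyboard walk length found."""
--     pwd_lower = password.lower()
--     for walk in KEYBOARD_WALKS:
--         for length in range(min(len(pwd_lower), len(walk)), 3, -1):
--             for i in range(len(walk) - length + 1):
--                 if walk[i:i+length] in pwd_lower:
--                     return length
--     return 0
-- ===== SOURCE B (Python) =====
-- KEYBOARD_WALKS = [
--     "qwertyuiop", "asdfghjkl", "zxcvbnm",
--     "poiuytrewq", "lkjhgfdsa", "mnbvcxz",
--     "qazwsxedcrfvtgbyhnujmikolp", "1qaz2wsx3edc4rfv5tgb6yhn7ujm8ik9ol",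
--     "1234567890", "0987654321", "qweasdzxc", "qazxswedc",
--     "147258369", "963852741", "123654789",
--     "!@#$%^&*()", "qwerty", "asdfgh", "zxcvbn",
-- ]
--
-- def check_keyboard_walk(password):
--     """Return the longest keyboard walk length found."""
--     p = password.lower()
--     n = len(p)
--     for walk in KEYBOARD_WALKS:
--         best = 0
--         for j in range(n):
--             L = 0
--             while j + L < n and p[j:j+L+1] in walk:
--                 L += 1
--             if L > best:
--                 best = L
--         if best >= 4:
--             return best
--     return 0
-- ===== Notes on version B (the rewrite author's own statement) =====
-- stated objective: alternative
-- what changed: Replaces A's descending-length enumeration of every walk-substring window (tested with 'in password') by a single left-to-right scan over the password that, at each position, extends the longest run still occurring in the walk and keeps the running maximum, returning it when it is >= 4.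
import Mathlib
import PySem

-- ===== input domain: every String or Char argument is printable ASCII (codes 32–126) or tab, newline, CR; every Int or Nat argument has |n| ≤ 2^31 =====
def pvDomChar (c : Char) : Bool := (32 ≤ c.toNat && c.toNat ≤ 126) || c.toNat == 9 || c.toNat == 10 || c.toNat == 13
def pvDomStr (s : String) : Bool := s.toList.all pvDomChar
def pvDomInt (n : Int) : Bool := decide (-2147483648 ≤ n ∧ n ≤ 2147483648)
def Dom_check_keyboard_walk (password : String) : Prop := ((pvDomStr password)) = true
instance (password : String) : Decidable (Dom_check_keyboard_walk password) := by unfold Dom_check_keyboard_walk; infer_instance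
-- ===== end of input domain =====

-- B replaces A's descending-length window enumeration over each walk by a single left-to-right
-- extend-scan over the password that tracks the longest common run with the walk (alternative decomposition).

def KEYBOARD_WALKS : List String := [
    "qwertyuiop", "asdfghjkl", "zxcvbnm",
    "poiuytrewq", "lkjhgfdsa", "mnbvcxz",
    "qazwsxedcrfvtgbyhnujmikolp", "1qaz2wsx3edc4rfv5tgb6yhn7ujm8ik9ol",
    "1234567890", "0987654321", "qweasdzxc", "qazxswedc",
    "147258369", "963852741", "123654789",
    "!@#$%^&*()", "qwerty", "asdfgh", "zxcvbn"]

-- ===== PORT A =====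
-- inner two loops of A: for length in range(min(len(p),len(walk)), 3, -1): for i in range(len(walk)-length+1):
--   if walk[i:i+length] in p: return length      ('sub in s' is PySem.Chars.isIn, exact)
def aInner (p w : List Char) : Option Int :=
  (PySem.List.pyRange (min (PySem.List.len p) (PySem.List.len w)) 3 (-1)).findSome? (fun length =>
    if (PySem.List.pyRange 0 (PySem.List.len w - length + 1) 1).any (fun i =>
         PySem.Chars.isIn (PySem.List.slice w (some i) (some (i + length))) p)
    then some length else none)

def check_keyboard_walk (password : String) : Int :=
  let p := PySem.Chars.lower password.toList      -- pwd_lower = password.lower()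
  (KEYBOARD_WALKS.findSome? (fun walk => aInner p walk.toList)).getD 0   -- early return / final 0

-- ===== PORT B =====
-- while j + L < n and p[j:j+L+1] in walk: L += 1    (fuel = n - j bounds the iterations;
--  the slice p[j:j+L+1] has nonnegative bounds, so it is exactly (p.drop j).take (L+1))
def bExtend (p w : List Char) (j : Nat) : Nat → Nat → Nat
  | 0, L => L
  | fuel+1, L =>
      if j + L < p.length && PySem.Chars.isIn ((p.drop j).take (L+1)) w
      then bExtend p w j fuel (L+1) else L

-- best = 0; for j in range(n): L = <while loop>; if L > best: best = L
def bBest (p w : List Char) : Nat :=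
  (List.range p.length).foldl (fun best j =>
    let L := bExtend p w j (p.length - j) 0
    if best < L then L else best) 0

-- for walk in KEYBOARD_WALKS: ... if best >= 4: return best    ; return 0
def bGo (p : List Char) : List String → Int
  | [] => 0
  | walk :: rest =>
      let best := bBest p walk.toList
      if 4 ≤ best then (best : Int) else bGo p rest

def check_keyboard_walk_alt (password : String) : Int :=
  bGo (PySem.Chars.lower password.toList) KEYBOARD_WALKS

-- ===== PRECONDITION & SPEC =====
def Spec_check_keyboard_walk (password : String) (out : Int) : Prop := out = check_keyboard_walk_alt password
instance (password : String) (out : Int) : Decidable (Spec_check_keyboard_walk password out) := by unfold Spec_check_keyboard_walk; infer_instance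

-- ===== CLAIM (what is proved, stated in full; the proofs are below) =====
def Claim_equal_check_keyboard_walk : Prop := ∀ (password : String), Dom_check_keyboard_walk password → Spec_check_keyboard_walk password (check_keyboard_walk password)

-- ===== LEMMAS AND PROOFS =====

-- 'p and w have a common (contiguous) substring of length L'
def Common (p w : List Char) (L : Nat) : Prop :=
  ∃ s : List Char, s.length = L ∧ s <:+: w ∧ s <:+: p

theorem drop_take_infix (xs : List Char) (j L : Nat) : (xs.drop j).take L <:+: xs :=
  (List.take_prefix _ _).isInfix.trans (List.drop_suffix _ _).isInfix

theorem infix_window {s p : List Char} (h : s <:+: p) :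
    ∃ j, j + s.length ≤ p.length ∧ s = (p.drop j).take s.length := by
  obtain ⟨t, u, rfl⟩ := h
  refine ⟨t.length, by simp, ?_⟩
  rw [List.append_assoc, List.drop_left, List.take_left]

theorem common_le {p w : List Char} {L : Nat} (h : Common p w L) :
    L ≤ p.length ∧ L ≤ w.length := by
  obtain ⟨s, rfl, hw, hp⟩ := h
  exact ⟨hp.length_le, hw.length_le⟩

-- A's innermost loop at a fixed length L finds a hit iff a common substring of length L exists
theorem cond_iff (p w : List Char) (L : Nat) (h1 : 1 ≤ L) (h2 : L ≤ w.length) :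
    ((PySem.List.pyRange 0 ((w.length : Int) - (L : Int) + 1) 1).any (fun i =>
        PySem.Chars.isIn (PySem.List.slice w (some i) (some (i + (L : Int)))) p)) = true
      ↔ Common p w L := by
  rw [List.any_eq_true]
  constructor
  · rintro ⟨i, hmem, hIn⟩
    rw [PySem.List.mem_pyRange_one] at hmem
    obtain ⟨hi0, hiu⟩ := hmem
    have hjL : i.toNat + L ≤ w.length := by omega
    rw [PySem.List.slice_toNat _ hi0 (by omega)] at hIn
    have he : (i + (L : Int)).toNat - i.toNat = L := by omega
    rw [he, PySem.Chars.isIn_iff_infix] at hIn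
    exact ⟨(w.drop i.toNat).take L, by simp; omega, drop_take_infix w i.toNat L, hIn⟩
  · rintro ⟨s, rfl, hw, hp⟩
    obtain ⟨j, hjl, hs⟩ := infix_window hw
    refine ⟨(j : Int), ?_, ?_⟩
    · rw [PySem.List.mem_pyRange_one]; omega
    · rw [PySem.List.slice_toNat _ (by omega) (by omega)]
      have he : ((j : Int) + (s.length : Int)).toNat - (j : Int).toNat = s.length := by omega
      rw [he, PySem.Chars.isIn_iff_infix, Int.toNat_natCast, ← hs]
      exact hp

-- the while loop keeps a window that matches, stays in bounds, and stops only when it cannot extend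
theorem bExtend_spec (p w : List Char) (j : Nat) :
    ∀ fuel L, (p.drop j).take L <:+: w → j + L + fuel = p.length →
      (p.drop j).take (bExtend p w j fuel L) <:+: w ∧
      j + bExtend p w j fuel L ≤ p.length ∧
      (j + bExtend p w j fuel L = p.length ∨
        ¬ ((p.drop j).take (bExtend p w j fuel L + 1) <:+: w)) := by
  intro fuel
  induction fuel with
  | zero => intro L hL hf; exact ⟨hL, by simp [bExtend]; omega, Or.inl (by simp [bExtend]; omega)⟩
  | succ fuel ih =>
    intro L hL hf
    by_cases hc : (j + L < p.length && PySem.Chars.isIn ((p.drop j).take (L+1)) w) = true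
    · rw [show bExtend p w j (fuel+1) L = bExtend p w j fuel (L+1) from by
        simp only [bExtend, hc, if_true]]
      simp only [Bool.and_eq_true, decide_eq_true_eq, PySem.Chars.isIn_iff_infix] at hc
      exact ih (L+1) hc.2 (by omega)
    · rw [show bExtend p w j (fuel+1) L = L from by simp only [bExtend, hc]; simp]
      simp only [Bool.and_eq_true, decide_eq_true_eq, PySem.Chars.isIn_iff_infix,
        not_and_or] at hc
      refine ⟨hL, by omega, ?_⟩
      rcases hc with h | h
      · left; omega
      · right; simpa using h

theorem bExtend_max (p w : List Char) (j : Nat) (hj : j ≤ p.length) :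
    ∀ K, j + K ≤ p.length → (p.drop j).take K <:+: w →
      K ≤ bExtend p w j (p.length - j) 0 := by
  intro K hK hKw
  set R := bExtend p w j (p.length - j) 0 with hR
  obtain ⟨h1, h2, h3⟩ := bExtend_spec p w j (p.length - j) 0 (by simp) (by omega)
  by_contra hlt
  push Not at hlt
  have hstep : (p.drop j).take (R + 1) <:+: w := by
    have : (p.drop j).take (R + 1) = ((p.drop j).take K).take (R + 1) := by
      rw [List.take_take]; congr 1; omega
    rw [this]
    exact (List.take_prefix _ _).isInfix.trans hKw
  rcases h3 with h | h
  · omega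
  · exact h hstep

theorem bBest_eq_maxfold (p w : List Char) :
    bBest p w = (List.range p.length).foldl
      (fun acc j => max acc (bExtend p w j (p.length - j) 0)) 0 := by
  unfold bBest
  apply PySem.List.foldl_congr_mem
  intro acc x _
  simp only
  split_ifs <;> omega

theorem bBest_common (p w : List Char) : Common p w (bBest p w) := by
  rw [bBest_eq_maxfold, ← List.foldl_map]
  rcases PySem.List.foldl_max_mem ((List.range p.length).map
      (fun j => bExtend p w j (p.length - j) 0)) 0 with h | h
  · exact ⟨[], by simp [h], List.nil_infix, List.nil_infix⟩
  · rw [List.mem_map] at h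
    obtain ⟨j, hj, hje⟩ := h
    rw [List.mem_range] at hj
    rw [← hje]
    obtain ⟨h1, h2, _⟩ := bExtend_spec p w j (p.length - j) 0 (by simp) (by omega)
    exact ⟨(p.drop j).take (bExtend p w j (p.length - j) 0),
      by simp; omega, h1, drop_take_infix p j _⟩

theorem bBest_ge (p w : List Char) {L : Nat} (h : Common p w L) : L ≤ bBest p w := by
  rcases Nat.eq_zero_or_pos L with rfl | hL
  · exact Nat.zero_le _
  obtain ⟨s, rfl, hw, hp⟩ := h
  obtain ⟨j, hjl, hs⟩ := infix_window hp
  have hjr : j < p.length := by omega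
  have hle : s.length ≤ bExtend p w j (p.length - j) 0 :=
    bExtend_max p w j (by omega) s.length hjl (hs ▸ hw)
  rw [bBest_eq_maxfold]
  have := (PySem.List.le_foldl_max_nat (List.range p.length)
    (fun j => bExtend p w j (p.length - j) 0) 0).2 j (List.mem_range.mpr hjr)
  omega

-- A's descending length loop, started at any a between bBest and min(len p, len w),
-- returns bBest iff it is ≥ 4 and none otherwise
theorem aRange (p w : List Char) :
    ∀ a : Nat, bBest p w ≤ a → a ≤ min p.length w.length →
      ((PySem.List.pyRange (a : Int) 3 (-1)).findSome? (fun length =>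
        if (PySem.List.pyRange 0 (PySem.List.len w - length + 1) 1).any (fun i =>
             PySem.Chars.isIn (PySem.List.slice w (some i) (some (i + length))) p)
        then some length else none))
      = if 4 ≤ bBest p w then some ((bBest p w : Nat) : Int) else none := by
  intro a
  induction a using Nat.strong_induction_on with
  | _ a ih =>
    intro hba hmin
    by_cases ha : a ≤ 3
    · rw [PySem.List.pyRange_neg_one_eq_nil (by exact_mod_cast ha)]
      simp only [List.findSome?_nil]
      rw [if_neg (by omega)]
    · rw [PySem.List.pyRange_neg_one_cons (by exact_mod_cast by omega : (3:Int) < (a:Int))]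
      rw [List.findSome?_cons]
      simp only [PySem.List.len_eq]
      by_cases hb : bBest p w = a
      · have hc := (cond_iff p w a (by omega) (by omega)).mpr (hb ▸ bBest_common p w)
        simp only [hc, if_true]
        rw [if_pos (by omega), hb]
      · have hc : ((PySem.List.pyRange 0 ((w.length : Int) - (a : Int) + 1) 1).any (fun i =>
            PySem.Chars.isIn (PySem.List.slice w (some i) (some (i + (a : Int)))) p)) = false := by
          rw [Bool.eq_false_iff]
          intro hcc
          have := bBest_ge p w ((cond_iff p w a (by omega) (by omega)).mp hcc)
          omega
        simp only [hc, Bool.false_eq_true, if_false]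
        have hcast : (a : Int) - 1 = ((a - 1 : Nat) : Int) := by omega
        rw [hcast]
        exact ih (a - 1) (by omega) (by omega) (by omega)

theorem aInner_eq (p w : List Char) :
    aInner p w = if 4 ≤ bBest p w then some ((bBest p w : Nat) : Int) else none := by
  unfold aInner
  have h1 : min (PySem.List.len p) (PySem.List.len w) = ((min p.length w.length : Nat) : Int) := by
    simp [PySem.List.len_eq, Nat.cast_min]
  rw [h1]
  have hb := common_le (bBest_common p w)
  exact aRange p w (min p.length w.length) (by omega) le_rfl

theorem go_eq (p : List Char) (ws : List String) :
    ((ws.findSome? (fun walk => aInner p walk.toList)).getD 0) = bGo p ws := by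
  induction ws with
  | nil => rfl
  | cons w ws ih =>
    rw [List.findSome?_cons, aInner_eq]
    by_cases h : 4 ≤ bBest p w.toList
    · simp [h, bGo]
    · simp [h, bGo, ih]

-- ===== VERDICT (by name: the statement is the Claim_ definition above) =====
theorem check_keyboard_walk_spec : Claim_equal_check_keyboard_walk := by
  intro password _
  unfold Spec_check_keyboard_walk check_keyboard_walk check_keyboard_walk_alt
  exact go_eq _ _
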